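-- pv_equiv track=rewrite | github.com/drz94/40-044py | ssplib.py | RFC_Tx
-- ===== SOURCE A (Python) =====
-- _END     =0xC0
--
-- _ESC     =0xDB
--
-- _ESC_END =0xDC
--
-- _ESC_ESC =0xDD
--
-- def RFC_Tx(tx_buff):
--     """
--     The function adds _END on each side of a message
--     and manages _END _ECS cases inside
--     """
--     out_buf_tx = []
--     out_buf_tx.append(_END)
--
--     for i in range(len(tx_buff)):
--         if (tx_buff[i] == _END):
--             out_buf_tx.append(_ESC)
--             out_buf_tx.append(_ESC_END)
--         else:
--             if (tx_buff[i] == _ESC):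
--                 out_buf_tx.append(_ESC)
--                 out_buf_tx.append( _ESC_ESC)
--             else:
--                 out_buf_tx.append(tx_buff[i])
--
--     out_buf_tx.append( _END)
--     return out_buf_tx
-- ===== SOURCE B (Python) =====
-- def _subst(buf, old, new):
--     """Global substitution: repeatedly find the first occurrence of `old`
--     and splice in `new`, copying the untouched prefix in one slice."""
--     out = []
--     rest = buf
--     while old in rest:
--         j = rest.index(old)
--         out += rest[:j] + new
--         rest = rest[j + 1:]
--     return out + rest
--
--
-- def RFC_Tx(tx_buff):
--     """SLIP-encode by two staged global substitutions (ESC first, then END)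
--     instead of a per-element conditional scan; wrap the result in END bytes."""
--     body = _subst(_subst(tx_buff, 0xDB, [0xDB, 0xDD]), 0xC0, [0xDB, 0xDC])
--     return [0xC0] + body + [0xC0]
-- ===== Notes on version B (the rewrite author's own statement) =====
-- stated objective: alternative
-- what changed: Replaces A's single per-element conditional scan by two staged global find-and-splice substitution passes (first escape 0xDB, then escape 0xC0, the order that keeps introduced escape bytes unescaped), wrapped in END bytes.
import Mathlib
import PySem

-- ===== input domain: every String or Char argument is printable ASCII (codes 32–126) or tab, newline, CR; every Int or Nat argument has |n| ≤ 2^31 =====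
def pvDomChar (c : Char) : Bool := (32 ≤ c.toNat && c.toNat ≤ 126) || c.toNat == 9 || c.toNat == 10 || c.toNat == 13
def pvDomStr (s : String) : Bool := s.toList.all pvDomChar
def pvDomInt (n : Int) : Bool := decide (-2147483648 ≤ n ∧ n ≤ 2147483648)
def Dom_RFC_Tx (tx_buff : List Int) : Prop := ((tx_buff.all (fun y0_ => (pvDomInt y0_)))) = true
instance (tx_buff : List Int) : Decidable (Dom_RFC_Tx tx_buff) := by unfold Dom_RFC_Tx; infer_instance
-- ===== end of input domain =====

-- B replaces A's per-element conditional scan by two staged global find-and-splice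
-- substitution passes (escape 0xDB first, then 0xC0); same result, no speed claim.


-- ===== PORT A =====
def RFC_Tx (tx_buff : List Int) : List Int :=
  -- out_buf_tx = [_END]; for i in range(len): branch on tx_buff[i]; append _END
  ((PySem.List.pyRange 0 (tx_buff.length : Int) 1).foldl
    (fun acc i =>
      if PySem.List.pyGetD tx_buff i 0 = 0xC0 then acc ++ [0xDB] ++ [0xDC]
      else if PySem.List.pyGetD tx_buff i 0 = 0xDB then acc ++ [0xDB] ++ [0xDD]
      else acc ++ [PySem.List.pyGetD tx_buff i 0])
    ([] ++ [0xC0])) ++ [0xC0]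

-- ===== PORT B =====
-- the 'while old in rest' loop of _subst: find first occurrence, splice, continue on the tail
def pvSubstGo (old : Int) (new : List Int) (out rest : List Int) : List Int :=
  match h : PySem.List.index? rest old with
  | none => out ++ rest
  | some j =>
      pvSubstGo old new (out ++ PySem.List.slice rest none (some (j : Int)) ++ new)
        (PySem.List.slice rest (some ((j : Int) + 1)) none)
termination_by rest.length
decreasing_by
  have hj := PySem.List.getElem_of_index?_eq_some h
  obtain ⟨hk, _, _⟩ := hj
  have : PySem.List.slice rest (some ((j : Int) + 1)) none = rest.drop (j + 1) := by
    have := PySem.List.slice_from_natCast rest (j + 1)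
    simpa using this
  rw [this]
  simp [List.length_drop]
  omega

def pvSubst (buf : List Int) (old : Int) (new : List Int) : List Int :=
  pvSubstGo old new [] buf

def RFC_Tx_alt (tx_buff : List Int) : List Int :=
  [(0xC0 : Int)] ++ pvSubst (pvSubst tx_buff 0xDB [0xDB, 0xDD]) 0xC0 [0xDB, 0xDC] ++ [(0xC0 : Int)]

-- ===== PRECONDITION & SPEC =====
def Spec_RFC_Tx (tx_buff : List Int) (out : List Int) : Prop := out = RFC_Tx_alt tx_buff
instance (tx_buff : List Int) (out : List Int) : Decidable (Spec_RFC_Tx tx_buff out) := by unfold Spec_RFC_Tx; infer_instance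

-- ===== CLAIM (what is proved, stated in full; the proofs are below) =====
def Claim_equal_RFC_Tx : Prop := ∀ (tx_buff : List Int), Dom_RFC_Tx tx_buff → Spec_RFC_Tx tx_buff (RFC_Tx tx_buff)

-- ===== LEMMAS AND PROOFS =====

theorem pv_flatMap_id_of_no_old (old : Int) (new : List Int) (l : List Int)
    (h : old ∉ l) : l.flatMap (fun b => if b = old then new else [b]) = l := by
  induction l with
  | nil => simp
  | cons x xs ih =>
      simp only [List.mem_cons, not_or] at h
      simp [List.flatMap_cons, Ne.symm, h.1, ih h.2]

theorem pvSubstGo_eq (old : Int) (new : List Int) :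
    ∀ n rest, rest.length ≤ n → ∀ out,
      pvSubstGo old new out rest = out ++ rest.flatMap (fun b => if b = old then new else [b]) := by
  intro n
  induction n with
  | zero =>
      intro rest hlen out
      have : rest = [] := List.eq_nil_of_length_eq_zero (Nat.le_zero.mp hlen)
      subst this
      rw [pvSubstGo]; simp
  | succ m ih =>
      intro rest hlen out
      rw [pvSubstGo]
      split
      · next hnone =>
          have hnot : old ∉ rest := (PySem.List.index?_eq_none_iff rest old).mp hnone
          rw [pv_flatMap_id_of_no_old old new rest hnot]
      · next j hsome =>
          obtain ⟨pre, suf, hrest, hplen, hpnot⟩ := (PySem.List.index?_eq_some_iff rest old j).mp hsome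
          have hslice1 : PySem.List.slice rest none (some (j : Int)) = pre := by
            rw [PySem.List.slice_to_natCast, hrest, ← hplen]
            simp
          have hslice2 : PySem.List.slice rest (some ((j : Int) + 1)) none = suf := by
            have := PySem.List.slice_from_natCast rest (j + 1)
            rw [show ((j : Int) + 1) = ((j + 1 : Nat) : Int) by push_cast; ring, this,
              hrest, ← hplen]
            simp [List.drop_append]
          have hsuf : suf.length ≤ m := by
            have : rest.length = pre.length + 1 + suf.length := by
              rw [hrest]; simp; omega
            omega
          rw [hslice1, hslice2, ih suf hsuf, hrest]
          simp [List.flatMap_append, pv_flatMap_id_of_no_old old new pre hpnot]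

theorem pvSubst_eq (buf : List Int) (old : Int) (new : List Int) :
    pvSubst buf old new = buf.flatMap (fun b => if b = old then new else [b]) := by
  unfold pvSubst
  simpa using pvSubstGo_eq old new buf.length buf le_rfl []

-- ===== VERDICT (by name: the statement is the Claim_ definition above) =====
theorem RFC_Tx_spec : Claim_equal_RFC_Tx := by
  intro tx_buff _
  unfold Spec_RFC_Tx RFC_Tx RFC_Tx_alt
  rw [PySem.List.foldl_pyRange_zero_pyGetD' tx_buff 0
      (fun acc v => if v = 0xC0 then acc ++ [0xDB] ++ [0xDC]
        else if v = 0xDB then acc ++ [0xDB] ++ [0xDD] else acc ++ [v]) ([] ++ [0xC0])]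
  have : tx_buff.foldl
      (fun acc v => if v = 0xC0 then acc ++ [0xDB] ++ [0xDC]
        else if v = 0xDB then acc ++ [0xDB] ++ [0xDD] else acc ++ [v]) ([] ++ [0xC0])
      = ([] ++ [(0xC0 : Int)]) ++
        tx_buff.flatMap (fun v => if v = 0xC0 then [0xDB, 0xDC]
          else if v = 0xDB then [0xDB, 0xDD] else [v]) := by
    have := PySem.List.foldl_append_eq_flatMap
      (g := fun v => if v = (0xC0 : Int) then [(0xDB : Int), 0xDC]
        else if v = 0xDB then [0xDB, 0xDD] else [v])
      (l := tx_buff) (acc := ([] ++ [(0xC0 : Int)]))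
    rw [← this]
    apply PySem.List.foldl_congr_mem
    intro acc v _
    split_ifs <;> simp
  rw [this, pvSubst_eq, pvSubst_eq, List.flatMap_assoc]
  simp only [List.nil_append, List.append_assoc, List.append_cancel_left_eq,
    List.append_cancel_right_eq]
  congr 1
  funext v
  by_cases h1 : v = 0xC0
  · subst h1; decide
  · by_cases h2 : v = 0xDB
    · subst h2; decide
    · simp [h1, h2]
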